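-- pv_equiv track=rewrite | github.com/KwonYeonghoo/Baekjoon_Algorithm | 백준/Bronze/10250. ACM 호텔/ACM 호텔.py | get_room_num
-- ===== SOURCE A (Python) =====
-- def get_room_num(arr):
--     H = arr[0]
--     W = arr[1]
--     N = arr[2]
--
--     # N = 10μΌ λ•
--     h_index = 1
--     w_index = 1
--     if N <= H:
--         h_index = N
--     else:
--         while N > H:
--             N -= H
--             w_index += 1
--         h_index = N
--     return w_index, h_index
-- ===== SOURCE B (Python) =====
-- def get_room_num(arr):
--     H = arr[0]
--     N = arr[2]
--     if N <= H:
--         return (1, N)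
--     q, r = divmod(N - 1, H)
--     return (q + 1, r + 1)
-- ===== Notes on version B (the rewrite author's own statement) =====
-- stated objective: alternative
-- what changed: Replaces A's repeated-subtraction while loop with closed-form divmod arithmetic ((N-1)//H, (N-1)%H).
import Mathlib
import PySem

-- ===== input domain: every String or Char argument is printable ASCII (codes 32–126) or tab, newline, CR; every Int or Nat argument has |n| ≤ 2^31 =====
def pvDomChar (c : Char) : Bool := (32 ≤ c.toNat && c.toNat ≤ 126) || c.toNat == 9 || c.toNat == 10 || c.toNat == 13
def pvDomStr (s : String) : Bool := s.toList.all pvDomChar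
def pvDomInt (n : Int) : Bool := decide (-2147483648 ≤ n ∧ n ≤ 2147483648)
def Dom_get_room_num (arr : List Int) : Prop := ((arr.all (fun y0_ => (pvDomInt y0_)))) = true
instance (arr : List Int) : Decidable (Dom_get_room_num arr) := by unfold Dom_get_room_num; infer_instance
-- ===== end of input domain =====

-- B replaces A's repeated-subtraction loop with closed-form floordiv/mod arithmetic (objective: alternative).


-- ===== PORT A =====
-- the 'while N > H' loop; the extra '1 ≤ H' in the guard only makes the recursion total
-- (for H < 1 and N > H the Python loop diverges, which Pre_ excludes)
def pvLoopA (H N w : Int) : Int × Int :=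
  if _h : H < N ∧ 1 ≤ H then pvLoopA H (N - H) (w + 1) else (w, N)
termination_by N.toNat
decreasing_by omega

def get_room_num (arr : List Int) : List Int :=
  let H := PySem.List.pyGetD arr 0 0
  let _W := PySem.List.pyGetD arr 1 0
  let N := PySem.List.pyGetD arr 2 0
  if N ≤ H then [1, N]
  else
    let p := pvLoopA H N 1
    [p.1, p.2]

-- ===== PORT B =====
def get_room_num_alt (arr : List Int) : List Int :=
  let H := PySem.List.pyGetD arr 0 0
  let N := PySem.List.pyGetD arr 2 0
  if N ≤ H then [1, N]
  else [PySem.Int.floordiv (N - 1) H + 1, PySem.Int.mod (N - 1) H + 1]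

-- ===== PRECONDITION & SPEC =====
-- Pre_ excludes lists shorter than 3 (Python A raises IndexError) and inputs with N > H together
-- with H < 1, on which A's while loop never terminates.
def Pre_get_room_num (arr : List Int) : Prop :=
  3 ≤ arr.length ∧ (arr.getD 2 0 ≤ arr.getD 0 0 ∨ 1 ≤ arr.getD 0 0)
instance (arr : List Int) : Decidable (Pre_get_room_num arr) := by unfold Pre_get_room_num; infer_instance
def pvWitness_get_room_num : List Int := [3, 5, 10]

def Spec_get_room_num (arr : List Int) (out : List Int) : Prop := out = get_room_num_alt arr
instance (arr : List Int) (out : List Int) : Decidable (Spec_get_room_num arr out) := by unfold Spec_get_room_num; infer_instance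

-- ===== CLAIM (what is proved, stated in full; the proofs are below) =====
def Claim_equal_get_room_num : Prop := ∀ (arr : List Int), Dom_get_room_num arr → Pre_get_room_num arr → Spec_get_room_num arr (get_room_num arr)

-- ===== LEMMAS AND PROOFS =====
theorem pvLoopA_closed (H N w : Int) (hH : 1 ≤ H) (hN : 1 ≤ N) :
    pvLoopA H N w = (w + PySem.Int.floordiv (N - 1) H, PySem.Int.mod (N - 1) H + 1) := by
  induction N, w using pvLoopA.induct H with
  | case1 N w h ih =>
    rw [pvLoopA, dif_pos h, ih (by omega)]
    rw [PySem.Int.floordiv_eq_ediv_of_pos (by omega), PySem.Int.floordiv_eq_ediv_of_pos (by omega),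
        PySem.Int.mod_eq_emod_of_pos (by omega), PySem.Int.mod_eq_emod_of_pos (by omega)]
    have h1 : N - 1 = (N - H - 1) + 1 * H := by ring
    rw [h1, Int.add_mul_ediv_right _ _ (by omega : H ≠ 0), Int.add_mul_emod_self_right]
    rw [Prod.mk.injEq]
    exact ⟨by ring, rfl⟩
  | case2 N w h =>
    rw [pvLoopA, dif_neg h]
    have hNH : N ≤ H := by omega
    rw [PySem.Int.floordiv_eq_ediv_of_pos (by omega), PySem.Int.mod_eq_emod_of_pos (by omega)]
    have hd : (N - 1) / H = 0 := Int.ediv_eq_zero_of_lt (by omega) (by omega)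
    have hm : (N - 1) % H = N - 1 := Int.emod_eq_of_lt (by omega) (by omega)
    rw [hd, hm]
    simp

theorem get_room_num_spec : Claim_equal_get_room_num := by
  intro arr hdom hpre
  unfold Spec_get_room_num
  obtain ⟨hlen, hor⟩ := hpre
  match arr, hlen with
  | a :: b :: c :: rest, _ =>
    have hc2 : (2:Int) = ((2:Nat):Int) := by norm_num
    have hc0 : (0:Int) = ((0:Nat):Int) := by norm_num
    have h2 : PySem.List.pyGet? (a :: b :: c :: rest) 2 = some c := by
      rw [hc2, PySem.List.pyGet?_natCast]; simp
    have h0 : PySem.List.pyGet? (a :: b :: c :: rest) 0 = some a := by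
      rw [hc0, PySem.List.pyGet?_natCast]; simp
    simp only [List.getD, List.getElem?_cons_zero, List.getElem?_cons_succ,
      Option.getD_some] at hor
    unfold get_room_num get_room_num_alt
    simp only [PySem.List.pyGetD, h0, h2, Option.getD_some]
    by_cases hle : c ≤ a
    · simp [hle]
    · have hH : 1 ≤ a := by
        rcases hor with h | h
        · omega
        · exact h
      simp only [if_neg hle]
      rw [pvLoopA_closed a c 1 hH (by omega)]
      simp only [List.cons.injEq, and_true]
      ring
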